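-- pv_equiv track=rewrite | github.com/axiomantic/spellbook | scripts/backfill_fractal_sessions.py | merge_updates
-- ===== SOURCE A (Python) =====
-- def merge_updates(all_updates):
--     """Merge multiple updates for the same node_id into a single record.
--
--     When multiple updates exist for the same node, we merge timestamp fields
--     and prefer the session_id from the claim_work call (earliest operation).
--     """
--     merged = {}
--     for update in all_updates:
--         node_id = update["node_id"]
--         if node_id not in merged:
--             merged[node_id] = {
--                 "node_id": node_id,
--                 "session_id": None,
--                 "claimed_at": None,
--                 "answered_at": None,
--                 "synthesized_at": None,
--             }
--         record = merged[node_id]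
--
--         # Merge fields, preferring earliest session_id
--         if update.get("session_id"):
--             if record["session_id"] is None:
--                 record["session_id"] = update["session_id"]
--             elif update.get("claimed_at"):
--                 # Prefer session from claim_work
--                 record["session_id"] = update["session_id"]
--
--         for field in ("claimed_at", "answered_at", "synthesized_at"):
--             if update.get(field) and record[field] is None:
--                 record[field] = update[field]
--
--     return merged
-- ===== SOURCE B (Python) =====
-- def merge_updates(all_updates):
--     """Merge multiple updates for the same node_id into a single record.
--
--     Group-by decomposition: first index updates by node_id (order-preserving),
--     then build each merged record from its group in one pass per field.
--     """
--     groups = {}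
--     for u in all_updates:
--         groups.setdefault(u["node_id"], []).append(u)
--
--     merged = {}
--     for node_id, group in groups.items():
--         claim = next(
--             (u for u in reversed(group)
--              if u.get("session_id") and u.get("claimed_at")),
--             None,
--         )
--         if claim is not None:
--             session_id = claim["session_id"]
--         else:
--             first = next((u for u in group if u.get("session_id")), None)
--             session_id = first["session_id"] if first is not None else None
--         merged[node_id] = {
--             "node_id": node_id,
--             "session_id": session_id,
--             "claimed_at": next((u["claimed_at"] for u in group if u.get("claimed_at")), None),
--             "answered_at": next((u["answered_at"] for u in group if u.get("answered_at")), None),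
--             "synthesized_at": next((u["synthesized_at"] for u in group if u.get("synthesized_at")), None),
--         }
--     return merged
-- ===== Notes on version B (the rewrite author's own statement) =====
-- stated objective: alternative
-- what changed: B replaces A's single fold that mutates a partial record per update with an order-preserving group-by over node_id followed by one record-construction pass per group (first-truthy scans per timestamp field; session_id from a reversed scan for the last claim-bearing update, falling back to the first session-bearing one).
import Mathlib
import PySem

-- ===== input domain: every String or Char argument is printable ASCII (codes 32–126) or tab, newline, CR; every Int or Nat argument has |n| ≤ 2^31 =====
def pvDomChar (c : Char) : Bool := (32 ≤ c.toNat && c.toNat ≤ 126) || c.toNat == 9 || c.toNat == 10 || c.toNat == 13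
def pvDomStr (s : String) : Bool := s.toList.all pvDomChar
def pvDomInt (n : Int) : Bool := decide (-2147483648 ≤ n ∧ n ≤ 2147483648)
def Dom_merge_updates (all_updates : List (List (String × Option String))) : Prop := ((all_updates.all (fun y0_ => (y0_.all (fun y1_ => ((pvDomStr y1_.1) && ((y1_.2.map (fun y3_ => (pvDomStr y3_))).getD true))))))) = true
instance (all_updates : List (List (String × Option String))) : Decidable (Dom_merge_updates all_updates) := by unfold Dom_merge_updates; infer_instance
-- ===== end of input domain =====

-- B re-implements the merge as an order-preserving group-by over node_id followed by one
-- record-construction pass per group (first-truthy scans; session_id by a reversed scan),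
-- instead of A's single fold that mutates a partial record per update; same return value.

-- ===== PORT A =====
-- update.get(k) (values are Optional[str]; missing key and stored None both read as None)
def uget (u : List (String × Option String)) (k : String) : Option String :=
  (u.lookup k).getD none

-- Python truthiness of an Optional[str]: None and "" are falsy
def truthy : Option String → Bool
  | some s => s != ""
  | none => false

-- update["node_id"]; Pre_ guarantees the key is present with a non-None value, so the
-- "" fallback is never reached on admitted inputs
def nodeId (u : List (String × Option String)) : String :=
  (uget u "node_id").getD ""

def emptyRec (nid : String) : PySem.Dict String (Option String) :=
  PySem.Dict.mk [("node_id", some nid), ("session_id", none), ("claimed_at", none),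
                 ("answered_at", none), ("synthesized_at", none)]

-- the loop body's mutation of `record`: the session_id branch, then the three-field loop
def recStep (record : PySem.Dict String (Option String)) (u : List (String × Option String)) :
    PySem.Dict String (Option String) :=
  let record :=
    if truthy (uget u "session_id") then
      if (PySem.Dict.getD record "session_id" none).isNone then
        PySem.Dict.insert record "session_id" (uget u "session_id")
      else if truthy (uget u "claimed_at") then
        PySem.Dict.insert record "session_id" (uget u "session_id")
      else record
    else record
  ["claimed_at", "answered_at", "synthesized_at"].foldl
    (fun r f =>
      if truthy (uget u f) && (PySem.Dict.getD r f none).isNone then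
        PySem.Dict.insert r f (uget u f)
      else r)
    record

def stepA (merged : PySem.Dict String (PySem.Dict String (Option String)))
    (u : List (String × Option String)) : PySem.Dict String (PySem.Dict String (Option String)) :=
  let nid := nodeId u
  let merged := if merged.contains nid then merged else merged.insert nid (emptyRec nid)
  let record := (merged.get? nid).getD (emptyRec nid)  -- always present here
  merged.insert nid (recStep record u)                 -- record is mutated in place in Python

def merge_updates (all_updates : List (List (String × Option String))) :
    List (String × List (String × Option String)) :=
  ((all_updates.foldl stepA PySem.Dict.empty).items).map (fun p => (p.1, p.2.items))

-- ===== PORT B =====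
def scPred (u : List (String × Option String)) : Bool :=
  truthy (uget u "session_id") && truthy (uget u "claimed_at")

def sPred (u : List (String × Option String)) : Bool :=
  truthy (uget u "session_id")

-- one merged record from the group of updates of a single node_id
def recordB (nid : String) (group : List (List (String × Option String))) :
    List (String × Option String) :=
  let session_id :=
    match group.reverse.find? scPred with
    | some u => uget u "session_id"
    | none =>
      match group.find? sPred with
      | some u => uget u "session_id"
      | none => none
  let tf : String → Option String := fun f =>
    match group.find? (fun u => truthy (uget u f)) with
    | some u => uget u f
    | none => none
  [("node_id", some nid), ("session_id", session_id), ("claimed_at", tf "claimed_at"),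
   ("answered_at", tf "answered_at"), ("synthesized_at", tf "synthesized_at")]

def merge_updates_alt (all_updates : List (List (String × Option String))) :
    List (String × List (String × Option String)) :=
  let groups := all_updates.foldl
    (fun g u => PySem.Dict.modify g (nodeId u) [] (· ++ [u])) PySem.Dict.empty
  groups.items.map (fun p => (p.1, recordB p.1 p.2))

-- ===== PRECONDITION & SPEC =====
-- Pre_ excludes updates whose "node_id" key is missing (A raises KeyError) or stored as
-- None (A returns a dict keyed by None, which is not a value of the String-keyed return type).
def Pre_merge_updates (all_updates : List (List (String × Option String))) : Prop :=
  (all_updates.all (fun u => ((u.lookup "node_id").getD none).isSome)) = true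

instance (all_updates : List (List (String × Option String))) :
    Decidable (Pre_merge_updates all_updates) := by unfold Pre_merge_updates; infer_instance

def pvWitness_merge_updates : (List (List (String × Option String))) :=
  [[("node_id", some "n1"), ("session_id", some "s1"), ("claimed_at", some "t1")],
   [("node_id", some "n1"), ("session_id", some "s2"), ("answered_at", some "t2")]]

def Spec_merge_updates (all_updates : List (List (String × Option String)))
    (out : List (String × List (String × Option String))) : Prop :=
  out = merge_updates_alt all_updates

instance (all_updates : List (List (String × Option String)))
    (out : List (String × List (String × Option String))) :
    Decidable (Spec_merge_updates all_updates out) := by unfold Spec_merge_updates; infer_instance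

-- ===== CLAIM (what is proved, stated in full; the proofs are below) =====
def Claim_equal_merge_updates : Prop := ∀ (all_updates : List (List (String × Option String))), Dom_merge_updates all_updates → Pre_merge_updates all_updates → Spec_merge_updates all_updates (merge_updates all_updates)

-- ===== LEMMAS AND PROOFS =====

-- A's accumulator as a function of the grouping accumulator
def mapRecs (g : PySem.Dict String (List (List (String × Option String)))) :
    PySem.Dict String (PySem.Dict String (Option String)) :=
  PySem.Dict.mk (g.items.map (fun p => (p.1, p.2.foldl recStep (emptyRec p.1))))

lemma get?_mapRecs (g : PySem.Dict String (List (List (String × Option String)))) (k : String) :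
    (mapRecs g).get? k = (g.get? k).map (fun grp => grp.foldl recStep (emptyRec k)) := by
  obtain ⟨l⟩ := g
  induction l with
  | nil => rfl
  | cons p l ih =>
    obtain ⟨k0, grp0⟩ := p
    simp only [mapRecs, List.map_cons] at *
    rw [PySem.Dict.get?_mk_cons, PySem.Dict.get?_mk_cons]
    by_cases h : k0 = k
    · subst h; simp
    · simp [show (k0 == k) = false by simpa using h, ih]

lemma contains_mapRecs (g : PySem.Dict String (List (List (String × Option String)))) (k : String) :
    (mapRecs g).contains k = g.contains k := by
  simp [mapRecs, PySem.Dict.contains, List.any_map, Function.comp_def]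

lemma insert_mapRecs (g : PySem.Dict String (List (List (String × Option String))))
    (k : String) (grp : List (List (String × Option String))) :
    mapRecs (g.insert k grp) = (mapRecs g).insert k (grp.foldl recStep (emptyRec k)) := by
  unfold PySem.Dict.insert
  rw [contains_mapRecs]
  by_cases h : g.contains k = true
  · rw [if_pos h, if_pos h]
    show mapRecs _ = _
    unfold mapRecs
    simp only [List.map_map]
    congr 1
    apply List.map_congr_left
    intro p _
    by_cases hp : p.1 = k <;> simp [hp]
  · rw [if_neg h, if_neg h]
    show mapRecs _ = _
    unfold mapRecs
    simp

lemma stepA_mapRecs (g : PySem.Dict String (List (List (String × Option String))))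
    (u : List (String × Option String)) :
    stepA (mapRecs g) u = mapRecs (PySem.Dict.modify g (nodeId u) [] (· ++ [u])) := by
  unfold PySem.Dict.modify
  rw [insert_mapRecs, List.foldl_append, List.foldl_cons, List.foldl_nil]
  simp only [stepA, contains_mapRecs]
  by_cases hc : g.contains (nodeId u) = true
  · rw [if_pos hc]
    have hs : (g.get? (nodeId u)).isSome := by
      rw [← PySem.Dict.contains_eq_isSome_get?, hc]
    obtain ⟨grp, hg⟩ := Option.isSome_iff_exists.mp hs
    rw [get?_mapRecs, hg, PySem.Dict.getD_of_get?_eq_some g [] hg]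
    rfl
  · rw [if_neg hc, PySem.Dict.getD_of_not_contains g [] (by simpa using hc),
      PySem.Dict.get?_insert_self, Option.getD_some, PySem.Dict.insert_insert_self]
    rfl

lemma foldl_stepA_mapRecs (l : List (List (String × Option String)))
    (g : PySem.Dict String (List (List (String × Option String)))) :
    l.foldl stepA (mapRecs g) =
      mapRecs (l.foldl (fun g u => PySem.Dict.modify g (nodeId u) [] (· ++ [u])) g) := by
  induction l generalizing g with
  | nil => rfl
  | cons u l ih => simp only [List.foldl_cons, stepA_mapRecs, ih]

-- the abstract 5-field record and the per-field step functions
def mkRec (nid : String) (s c a y : Option String) : PySem.Dict String (Option String) :=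
  PySem.Dict.mk [("node_id", some nid), ("session_id", s), ("claimed_at", c),
                 ("answered_at", a), ("synthesized_at", y)]

def sStep (s : Option String) (u : List (String × Option String)) : Option String :=
  if truthy (uget u "session_id") then
    if s.isNone then uget u "session_id"
    else if truthy (uget u "claimed_at") then uget u "session_id"
    else s
  else s

def fStep (f : String) (c : Option String) (u : List (String × Option String)) : Option String :=
  if truthy (uget u f) && c.isNone then uget u f else c

lemma getD_mkRec_s (nid : String) (s c a y : Option String) :
    (mkRec nid s c a y).getD "session_id" none = s := rfl

lemma ins_mkRec_s (nid : String) (s c a y v : Option String) :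
    (mkRec nid s c a y).insert "session_id" v = mkRec nid v c a y := rfl

lemma getD_mkRec_c (nid : String) (s c a y : Option String) :
    (mkRec nid s c a y).getD "claimed_at" none = c := rfl

lemma ins_mkRec_c (nid : String) (s c a y v : Option String) :
    (mkRec nid s c a y).insert "claimed_at" v = mkRec nid s v a y := rfl

lemma getD_mkRec_a (nid : String) (s c a y : Option String) :
    (mkRec nid s c a y).getD "answered_at" none = a := rfl

lemma ins_mkRec_a (nid : String) (s c a y v : Option String) :
    (mkRec nid s c a y).insert "answered_at" v = mkRec nid s c v y := rfl

lemma getD_mkRec_y (nid : String) (s c a y : Option String) :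
    (mkRec nid s c a y).getD "synthesized_at" none = y := rfl

lemma ins_mkRec_y (nid : String) (s c a y v : Option String) :
    (mkRec nid s c a y).insert "synthesized_at" v = mkRec nid s c a v := rfl

lemma sessPart_mkRec (nid : String) (s c a y : Option String) (u : List (String × Option String)) :
    (if truthy (uget u "session_id") then
      if (PySem.Dict.getD (mkRec nid s c a y) "session_id" none).isNone then
        PySem.Dict.insert (mkRec nid s c a y) "session_id" (uget u "session_id")
      else if truthy (uget u "claimed_at") then
        PySem.Dict.insert (mkRec nid s c a y) "session_id" (uget u "session_id")
      else (mkRec nid s c a y)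
    else (mkRec nid s c a y)) = mkRec nid (sStep s u) c a y := by
  rw [getD_mkRec_s, ins_mkRec_s]
  unfold sStep
  split_ifs <;> rfl

lemma body_mkRec_c (nid : String) (s c a y : Option String) (u : List (String × Option String)) :
    (if truthy (uget u "claimed_at") && (PySem.Dict.getD (mkRec nid s c a y) "claimed_at" none).isNone then
        PySem.Dict.insert (mkRec nid s c a y) "claimed_at" (uget u "claimed_at")
      else (mkRec nid s c a y)) = mkRec nid s (fStep "claimed_at" c u) a y := by
  rw [getD_mkRec_c, ins_mkRec_c]
  unfold fStep
  split_ifs <;> rfl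

lemma body_mkRec_a (nid : String) (s c a y : Option String) (u : List (String × Option String)) :
    (if truthy (uget u "answered_at") && (PySem.Dict.getD (mkRec nid s c a y) "answered_at" none).isNone then
        PySem.Dict.insert (mkRec nid s c a y) "answered_at" (uget u "answered_at")
      else (mkRec nid s c a y)) = mkRec nid s c (fStep "answered_at" a u) y := by
  rw [getD_mkRec_a, ins_mkRec_a]
  unfold fStep
  split_ifs <;> rfl

lemma body_mkRec_y (nid : String) (s c a y : Option String) (u : List (String × Option String)) :
    (if truthy (uget u "synthesized_at") && (PySem.Dict.getD (mkRec nid s c a y) "synthesized_at" none).isNone then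
        PySem.Dict.insert (mkRec nid s c a y) "synthesized_at" (uget u "synthesized_at")
      else (mkRec nid s c a y)) = mkRec nid s c a (fStep "synthesized_at" y u) := by
  rw [getD_mkRec_y, ins_mkRec_y]
  unfold fStep
  split_ifs <;> rfl

lemma recStep_mkRec (nid : String) (s c a y : Option String) (u : List (String × Option String)) :
    recStep (mkRec nid s c a y) u =
      mkRec nid (sStep s u) (fStep "claimed_at" c u) (fStep "answered_at" a u)
        (fStep "synthesized_at" y u) := by
  simp only [recStep]
  rw [sessPart_mkRec, List.foldl_cons, body_mkRec_c, List.foldl_cons, body_mkRec_a,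
    List.foldl_cons, body_mkRec_y, List.foldl_nil]

lemma foldl_recStep_mkRec (grp : List (List (String × Option String))) (nid : String)
    (s c a y : Option String) :
    grp.foldl recStep (mkRec nid s c a y) =
      mkRec nid (grp.foldl sStep s) (grp.foldl (fStep "claimed_at") c)
        (grp.foldl (fStep "answered_at") a) (grp.foldl (fStep "synthesized_at") y) := by
  induction grp generalizing s c a y with
  | nil => rfl
  | cons u grp ih => simp only [List.foldl_cons, recStep_mkRec, ih]

lemma truthy_isNone_false {v : Option String} (h : truthy v = true) : v.isNone = false := by
  cases v <;> simp_all [truthy]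

lemma foldl_fStep_of_some (f : String) (grp : List (List (String × Option String)))
    (c : Option String) (h : c.isNone = false) : grp.foldl (fStep f) c = c := by
  induction grp with
  | nil => rfl
  | cons u grp ih => simp [fStep, h, ih]

def fB (f : String) (grp : List (List (String × Option String))) : Option String :=
  match grp.find? (fun u => truthy (uget u f)) with
  | some u => uget u f
  | none => none

def sB (grp : List (List (String × Option String))) : Option String :=
  match grp.reverse.find? scPred with
  | some u => uget u "session_id"
  | none =>
    match grp.find? sPred with
    | some u => uget u "session_id"
    | none => none

lemma foldl_fStep_none (f : String) (grp : List (List (String × Option String))) :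
    grp.foldl (fStep f) none = fB f grp := by
  induction grp with
  | nil => rfl
  | cons u grp ih =>
    by_cases ht : truthy (uget u f) = true
    · rw [List.foldl_cons, fB, List.find?_cons_of_pos (by simpa using ht)]
      show List.foldl (fStep f) (fStep f none u) grp = _
      rw [fStep]
      simp only [Option.isNone_none, Bool.and_true, ht, if_true]
      exact foldl_fStep_of_some f grp _ (truthy_isNone_false ht)
    · rw [List.foldl_cons, fB, List.find?_cons_of_neg (by simpa using ht)]
      show List.foldl (fStep f) (fStep f none u) grp = _
      rw [fStep]
      simp only [Option.isNone_none, Bool.and_true, ht, Bool.false_eq_true, if_false]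
      exact ih.trans rfl

lemma sStep_of_isNone_false (s : Option String) (u : List (String × Option String))
    (hs : s.isNone = false) (hsc : scPred u = false) : sStep s u = s := by
  rw [sStep]
  by_cases hts : truthy (uget u "session_id") = true
  · have htc : truthy (uget u "claimed_at") = false := by
      simp only [scPred, hts, Bool.true_and] at hsc; exact hsc
    simp [hts, hs, htc]
  · simp [hts]

lemma sB_append (grp : List (List (String × Option String)))
    (u : List (String × Option String)) : sB (grp ++ [u]) = sStep (sB grp) u := by
  by_cases hsc : scPred u = true
  · have hs : truthy (uget u "session_id") = true := by simp_all [scPred]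
    have hc : truthy (uget u "claimed_at") = true := by simp_all [scPred]
    unfold sB
    rw [List.reverse_append, List.reverse_singleton, List.singleton_append,
      List.find?_cons_of_pos hsc]
    rw [sStep]
    simp only [hs, hc, if_true]
    split_ifs <;> rfl
  · replace hsc : scPred u = false := by simpa using hsc
    unfold sB
    rw [List.reverse_append, List.reverse_singleton, List.singleton_append,
      List.find?_cons_of_neg (by simp [hsc]), List.find?_append]
    cases hrc : grp.reverse.find? scPred with
    | some w =>
      have hu := List.find?_some hrc
      simp only [scPred, Bool.and_eq_true] at hu
      rw [sStep_of_isNone_false _ _ (truthy_isNone_false hu.1) hsc]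
    | none =>
      cases hf : grp.find? sPred with
      | some w =>
        have hw : (uget w "session_id").isNone = false :=
          truthy_isNone_false (by simpa [sPred] using List.find?_some hf)
        simp only [Option.some_or]
        rw [sStep_of_isNone_false _ _ hw hsc]
      | none =>
        simp only [Option.none_or]
        rw [sStep]
        by_cases hts : truthy (uget u "session_id") = true
        · rw [List.find?_cons_of_pos (by simpa [sPred] using hts)]
          simp [hts]
        · rw [List.find?_cons_of_neg (by simpa [sPred] using hts), List.find?_nil]
          simp [hts]

lemma foldl_sStep_none (grp : List (List (String × Option String))) :
    grp.foldl sStep none = sB grp := by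
  induction grp using List.reverseRecOn with
  | nil => rfl
  | append_singleton grp u ih =>
    rw [List.foldl_append, List.foldl_cons, List.foldl_nil, ih, sB_append]

lemma foldl_recStep_emptyRec (nid : String) (grp : List (List (String × Option String))) :
    (grp.foldl recStep (emptyRec nid)).items = recordB nid grp := by
  rw [show emptyRec nid = mkRec nid none none none none from rfl, foldl_recStep_mkRec,
    foldl_sStep_none, foldl_fStep_none, foldl_fStep_none, foldl_fStep_none]
  rfl

theorem merge_eq (all_updates : List (List (String × Option String))) :
    merge_updates all_updates = merge_updates_alt all_updates := by
  unfold merge_updates merge_updates_alt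
  rw [show (PySem.Dict.empty : PySem.Dict String (PySem.Dict String (Option String))) =
    mapRecs PySem.Dict.empty from rfl, foldl_stepA_mapRecs]
  simp only [mapRecs, List.map_map]
  apply List.map_congr_left
  intro p _
  simp [foldl_recStep_emptyRec]

-- ===== VERDICT (by name: the statement is the Claim_ definition above) =====
theorem merge_updates_spec : Claim_equal_merge_updates := by
  intro all_updates _ _
  unfold Spec_merge_updates
  exact merge_eq all_updates
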